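-- pv_equiv track=rewrite | github.com/matechino1319/Portafolio | juego/level_one.py | get_current_section_color
-- ===== SOURCE A (Python) =====
-- SECTION_COLORS = [
--     ((255, 120, 120), (200, 60, 60)), # Rojo
--     ((120, 255, 120), (60, 200, 60)), # Verde
--     ((120, 120, 255), (60, 60, 200)), # Azul
--     ((255, 255, 120), (200, 200, 60)), # Amarillo
--     ((255, 120, 255), (200, 60, 200)), # Magenta
--     ((120, 255, 255), (60, 200, 200)), # Cyan
--     ((255, 180, 80), (200, 120, 40)), # Naranja
--     ((150, 100, 255), (90, 50, 200)), # Púrpura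
-- ]
--
-- LEVEL_MAP = []
--
-- def get_current_section_color(index, section_markers):
--     """Devuelve la tupla de color (brillante, oscuro) para el índice de nivel dado."""
--     current_section_idx = 0
--     full_markers = sorted(list(set(section_markers)))
--     if not full_markers or full_markers[-1] < len(LEVEL_MAP):
--         full_markers.append(len(LEVEL_MAP))
--
--     for idx_marker in range(len(full_markers) - 1):
--         start = full_markers[idx_marker]
--         end = full_markers[idx_marker+1]
--         if start <= index < end:
--             current_section_idx = idx_marker
--             break
--
--     if index >= len(LEVEL_MAP) - 1 and len(full_markers) > 1:
--         current_section_idx = len(full_markers) - 2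
--
--     return SECTION_COLORS[current_section_idx % len(SECTION_COLORS)]
-- ===== SOURCE B (Python) =====
-- import bisect
--
-- SECTION_COLORS = [
--     ((255, 120, 120), (200, 60, 60)),
--     ((120, 255, 120), (60, 200, 60)),
--     ((120, 120, 255), (60, 60, 200)),
--     ((255, 255, 120), (200, 200, 60)),
--     ((255, 120, 255), (200, 60, 200)),
--     ((120, 255, 255), (60, 200, 200)),
--     ((255, 180, 80), (200, 120, 40)),
--     ((150, 100, 255), (90, 50, 200)),
-- ]
--
-- LEVEL_MAP = []
--
-- def get_current_section_color(index, section_markers):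
--     """Devuelve la tupla de color (brillante, oscuro) para el índice de nivel dado."""
--     full = sorted(set(section_markers))
--     if not full or full[-1] < len(LEVEL_MAP):
--         full.append(len(LEVEL_MAP))
--     if index >= len(LEVEL_MAP) - 1 and len(full) > 1:
--         idx = len(full) - 2
--     else:
--         pos = bisect.bisect_right(full, index) - 1
--         idx = pos if 0 <= pos < len(full) - 1 else 0
--     return SECTION_COLORS[idx % len(SECTION_COLORS)]
-- ===== Notes on version B (the rewrite author's own statement) =====
-- stated objective: idiomatic
-- what changed: The linear scan over consecutive marker pairs (with break) is replaced by bisect.bisect_right on the sorted marker list, clamped to [0, len-2], with the end-of-map override decided up front instead of overwriting the scan's result.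
import Mathlib
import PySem

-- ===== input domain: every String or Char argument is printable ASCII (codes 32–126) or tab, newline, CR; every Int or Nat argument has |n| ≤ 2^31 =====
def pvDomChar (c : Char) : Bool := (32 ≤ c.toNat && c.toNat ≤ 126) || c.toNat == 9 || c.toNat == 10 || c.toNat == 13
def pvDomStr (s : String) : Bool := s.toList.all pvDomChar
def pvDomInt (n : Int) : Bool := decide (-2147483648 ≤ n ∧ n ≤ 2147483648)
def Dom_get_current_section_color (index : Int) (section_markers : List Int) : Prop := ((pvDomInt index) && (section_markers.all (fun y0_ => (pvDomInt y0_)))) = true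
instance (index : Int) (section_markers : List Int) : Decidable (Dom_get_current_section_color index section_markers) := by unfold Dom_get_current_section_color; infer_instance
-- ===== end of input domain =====

-- B replaces A's linear interval scan over consecutive marker pairs by a bisect_right
-- binary search with a clamp (objective: idiomatic/alternative; same observable result).

-- module constants of level_one.py
def pvSECTION_COLORS : List ((Int × Int × Int) × (Int × Int × Int)) :=
  [((255, 120, 120), (200, 60, 60)),
   ((120, 255, 120), (60, 200, 60)),
   ((120, 120, 255), (60, 60, 200)),
   ((255, 255, 120), (200, 200, 60)),
   ((255, 120, 255), (200, 60, 200)),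
   ((120, 255, 255), (60, 200, 200)),
   ((255, 180, 80), (200, 120, 40)),
   ((150, 100, 255), (90, 50, 200))]

-- LEVEL_MAP = [] in the module; only its length is used, so the element type is irrelevant
def pvLEVEL_MAP : List Int := []

-- ===== PORT A =====
-- the 'for idx_marker in range(...)' loop with break, over the remaining indices;
-- full_markers[idx] is always in range here (indices come from range(len-1)), pyGetD is exact
def pvScanLoop (full : List Int) (index : Int) : List Int → Int
  | [] => 0
  | i :: rest =>
      if PySem.List.pyGetD full i 0 ≤ index ∧ index < PySem.List.pyGetD full (i + 1) 0
      then i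
      else pvScanLoop full index rest

def get_current_section_color (index : Int) (section_markers : List Int) : (Int × Int × Int) × (Int × Int × Int) :=
  let full_markers := PySem.List.sorted (PySem.Set.ofList section_markers) (fun x => x)
  -- 'if not full_markers or full_markers[-1] < len(LEVEL_MAP)' — short-circuit, [-1] only read when nonempty
  let full_markers :=
    if full_markers.isEmpty || decide (PySem.List.pyGetD full_markers (-1) 0 < (pvLEVEL_MAP.length : Int))
    then full_markers ++ [(pvLEVEL_MAP.length : Int)]
    else full_markers
  let current_section_idx : Int :=
    pvScanLoop full_markers index (PySem.List.pyRange 0 ((full_markers.length : Int) - 1) 1)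
  let current_section_idx : Int :=
    if index ≥ (pvLEVEL_MAP.length : Int) - 1 ∧ (full_markers.length : Int) > 1
    then (full_markers.length : Int) - 2
    else current_section_idx
  -- SECTION_COLORS[idx % 8]: idx % 8 ∈ [0,8) so the access is in range; pyGetD is exact
  PySem.List.pyGetD pvSECTION_COLORS (PySem.Int.mod current_section_idx (pvSECTION_COLORS.length : Int)) ((0,0,0),(0,0,0))

-- ===== PORT B =====
def get_current_section_color_alt (index : Int) (section_markers : List Int) : (Int × Int × Int) × (Int × Int × Int) :=
  let full := PySem.List.sorted (PySem.Set.ofList section_markers) (fun x => x)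
  let full :=
    if full.isEmpty || decide (PySem.List.pyGetD full (-1) 0 < (pvLEVEL_MAP.length : Int))
    then full ++ [(pvLEVEL_MAP.length : Int)]
    else full
  let idx : Int :=
    if index ≥ (pvLEVEL_MAP.length : Int) - 1 ∧ (full.length : Int) > 1
    then (full.length : Int) - 2
    else
      let pos : Int := (PySem.List.bisectRight full index : Int) - 1
      if 0 ≤ pos ∧ pos < (full.length : Int) - 1 then pos else 0
  PySem.List.pyGetD pvSECTION_COLORS (PySem.Int.mod idx (pvSECTION_COLORS.length : Int)) ((0,0,0),(0,0,0))

-- ===== PRECONDITION & SPEC =====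
def Spec_get_current_section_color (index : Int) (section_markers : List Int) (out : (Int × Int × Int) × (Int × Int × Int)) : Prop := out = get_current_section_color_alt index section_markers
instance (index : Int) (section_markers : List Int) (out : (Int × Int × Int) × (Int × Int × Int)) : Decidable (Spec_get_current_section_color index section_markers out) := by unfold Spec_get_current_section_color; infer_instance

-- ===== CLAIM (what is proved, stated in full; the proofs are below) =====
def Claim_equal_get_current_section_color : Prop := ∀ (index : Int) (section_markers : List Int), Dom_get_current_section_color index section_markers → Spec_get_current_section_color index section_markers (get_current_section_color index section_markers)

-- ===== LEMMAS AND PROOFS =====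

-- in-range integer-cast access
lemma pvGetD_nat (full : List Int) (k : Nat) (hk : k < full.length) :
    PySem.List.pyGetD full (k : Int) 0 = full[k] := by
  rw [PySem.List.pyGetD_eq_getElem full 0 (Int.natCast_nonneg k) (by exact_mod_cast hk)]
  simp

-- the scan returns 0 when no visited interval contains index
lemma scan_none (full : List Int) (index : Int) :
    ∀ l : List Int,
      (∀ i ∈ l, ¬ (PySem.List.pyGetD full i 0 ≤ index ∧ index < PySem.List.pyGetD full (i + 1) 0)) →
      pvScanLoop full index l = 0 := by
  intro l
  induction l with
  | nil => intro _; rfl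
  | cons i rest ih =>
      intro h
      simp only [pvScanLoop]
      rw [if_neg (h i (by simp))]
      exact ih (fun j hj => h j (by simp [hj]))

-- the scan returns the first index whose interval contains index
lemma scan_found (full : List Int) (index : Int) (i : Int) (l2 : List Int)
    (hi : PySem.List.pyGetD full i 0 ≤ index ∧ index < PySem.List.pyGetD full (i + 1) 0) :
    ∀ l1 : List Int,
      (∀ j ∈ l1, ¬ (PySem.List.pyGetD full j 0 ≤ index ∧ index < PySem.List.pyGetD full (j + 1) 0)) →
      pvScanLoop full index (l1 ++ i :: l2) = i := by
  intro l1
  induction l1 with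
  | nil => intro _; simp only [List.nil_append, pvScanLoop]; rw [if_pos hi]
  | cons j rest ih =>
      intro h
      simp only [List.cons_append, pvScanLoop]
      rw [if_neg (h j (by simp))]
      exact ih (fun k hk => h k (by simp [hk]))

-- the interval scan agrees with the clamped bisect position on a strictly increasing list
lemma scan_eq_bisect (full : List Int) (index : Int)
    (hlt : full.Pairwise (· < ·)) :
    pvScanLoop full index (PySem.List.pyRange 0 ((full.length : Int) - 1) 1) =
      (if 0 ≤ (PySem.List.bisectRight full index : Int) - 1 ∧
          (PySem.List.bisectRight full index : Int) - 1 < (full.length : Int) - 1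
       then (PySem.List.bisectRight full index : Int) - 1 else 0) := by
  obtain ⟨hr1, hr2, hr3⟩ :=
    PySem.List.bisectRight_spec full index (hlt.imp (fun h => le_of_lt h))
  set r : Nat := PySem.List.bisectRight full index with hrdef
  set n : Nat := full.length with hndef
  by_cases hmid : 1 ≤ r ∧ r + 1 ≤ n
  · -- the bisect position r-1 names a real interval: the scan finds exactly it
    obtain ⟨h1, h2⟩ := hmid
    rw [if_pos (by constructor <;> omega)]
    have hsplit : PySem.List.pyRange 0 ((n : Int) - 1) 1 =
        PySem.List.pyRange 0 ((r : Int) - 1) 1 ++ ((r : Int) - 1) ::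
          PySem.List.pyRange (r : Int) ((n : Int) - 1) 1 := by
      rw [PySem.List.pyRange_one_append 0 ((r : Int) - 1) ((n : Int) - 1) (by omega) (by omega)]
      congr 1
      rw [PySem.List.pyRange_one_cons (by omega : (r : Int) - 1 < (n : Int) - 1)]
      congr 2
      omega
    rw [hsplit]
    apply scan_found
    · constructor
      · rw [show ((r : Int) - 1) = ((r - 1 : Nat) : Int) by omega,
            pvGetD_nat full (r - 1) (by omega)]
        exact hr2 (r - 1) (by omega) (by omega)
      · rw [show ((r : Int) - 1 + 1) = ((r : Nat) : Int) by omega,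
            pvGetD_nat full r (by omega)]
        exact hr3 r (by omega) (le_refl _)
    · intro j hj
      rw [PySem.List.mem_pyRange_one] at hj
      obtain ⟨hj0, hjlt⟩ := hj
      lift j to ℕ using hj0 with k
      intro hcond
      rw [show ((k : Int) + 1) = ((k + 1 : Nat) : Int) by push_cast; ring,
          pvGetD_nat full (k + 1) (by omega)] at hcond
      exact absurd hcond.2 (not_lt.mpr (hr2 (k + 1) (by omega) (by omega)))
  · -- the bisect position is clamped to 0 and no interval contains index
    rw [if_neg (by omega)]
    apply scan_none
    intro i hi
    rw [PySem.List.mem_pyRange_one] at hi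
    obtain ⟨hi0, hilt⟩ := hi
    lift i to ℕ using hi0 with k
    intro hcond
    rw [pvGetD_nat full k (by omega),
        show ((k : Int) + 1) = ((k + 1 : Nat) : Int) by push_cast; ring,
        pvGetD_nat full (k + 1) (by omega)] at hcond
    rcases Nat.lt_or_ge r 1 with h0 | h0
    · exact absurd hcond.1 (not_le.mpr (hr3 k (by omega) (by omega)))
    · -- here r = n (since not 1 ≤ r ∧ r+1 ≤ n), so full[k+1] ≤ index
      exact absurd hcond.2 (not_lt.mpr (hr2 (k + 1) (by omega) (by omega)))

-- the final marker list (after the conditional sentinel append) is strictly increasing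
lemma full_pairwise (section_markers : List Int) :
    (if (PySem.List.sorted (PySem.Set.ofList section_markers) (fun x => x)).isEmpty ||
        decide (PySem.List.pyGetD (PySem.List.sorted (PySem.Set.ofList section_markers) (fun x => x)) (-1) 0 < (pvLEVEL_MAP.length : Int))
     then PySem.List.sorted (PySem.Set.ofList section_markers) (fun x => x) ++ [(pvLEVEL_MAP.length : Int)]
     else PySem.List.sorted (PySem.Set.ofList section_markers) (fun x => x)).Pairwise (· < ·) := by
  set s := PySem.List.sorted (PySem.Set.ofList section_markers) (fun x => x) with hs
  have hp : s.Pairwise (· < ·) := PySem.List.sorted_ofList_pairwise_lt section_markers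
  by_cases hc : s.isEmpty || decide (PySem.List.pyGetD s (-1) 0 < (pvLEVEL_MAP.length : Int))
  · rw [if_pos hc]
    rcases List.eq_nil_or_concat s with hnil | ⟨l, a, hla⟩
    · simp [hnil]
    · -- nonempty: the condition forces last < len(LEVEL_MAP), and every element ≤ last
      have hlast : PySem.List.pyGetD s (-1) 0 = a := by
        rw [hla]
        simp [PySem.List.pyGetD, PySem.List.pyGet?, PySem.List.pyIdx?]
      have hne : s.isEmpty = false := by rw [hla]; simp
      have ha : a < (pvLEVEL_MAP.length : Int) := by
        rw [hne, Bool.false_or, decide_eq_true_eq, hlast] at hc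
        exact hc
      rw [hla] at hp ⊢
      simp only [List.concat_eq_append] at hp ⊢
      rw [List.pairwise_append] at hp ⊢
      obtain ⟨hl, _, hcross⟩ := hp
      refine ⟨by rw [List.pairwise_append]; exact ⟨hl, by simp, hcross⟩, by simp, ?_⟩
      intro x hx y hy
      simp only [List.mem_singleton] at hy
      subst hy
      rcases List.mem_append.mp hx with hxl | hxa
      · exact lt_trans (hcross x hxl a (by simp)) ha
      · simp only [List.mem_singleton] at hxa; subst hxa; exact ha
  · rw [if_neg hc]; exact hp

-- ===== VERDICT (by name: the statement is the Claim_ definition above) =====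
theorem get_current_section_color_spec : Claim_equal_get_current_section_color := by
  intro index section_markers _
  unfold Spec_get_current_section_color
  simp only [get_current_section_color, get_current_section_color_alt]
  rw [scan_eq_bisect _ index (full_pairwise section_markers)]
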